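-- pv_equiv track=rewrite | github.com/ralphromero/alpha-order | AlphaOrder.py | PairedFrequencyAlphaOrder
-- ===== SOURCE A (Python) =====
-- def GetAdjacentPairList(word):
--     pairs = [word[x] + word[x+1] for x,y in enumerate(word) if x+1 < len(word)]
--     sortedPairs = [''.join(sorted(x)) for x in pairs]
--     sortedPairsNoDupes = list(set(sortedPairs))
--     sortedPairsNoDupes = [x for x in sortedPairsNoDupes if x[0] != x[1]]
--     return sorted(sortedPairsNoDupes)
--
-- def CombineFrequencyDictAndList(theDict, nonDupeList):
--     return {x:(int(theDict.get(x, 0))+1) for x in nonDupeList}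
--
-- def UniqueValuesFromDict(theDict):
--     return sorted(list(set([theDict[x] for x in theDict])),reverse=True)
--
-- def GetDictKeysFromValues(keyVals, val):
--     tempList = [list(x) for x in keyVals if keyVals[x] == val]
--     return SortMakeUniqueList([x for y in tempList for x in y])
--
-- def SortMakeUniqueList(theList):
--     return sorted(list(set(theList)))
--
-- def CombineUniqueSecondList(lista, listb):
--     return lista + [x for x in listb if x not in lista]
--
-- def PairedFrequencyAlphaOrder(wordlist):
--     adjacencyDict = {}
--     orderList = []
--     for y in wordlist:
--         adjacencyDict.update(CombineFrequencyDictAndList(adjacencyDict, GetAdjacentPairList(y)))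
--     uniqueValues = UniqueValuesFromDict(adjacencyDict)
--     orderList = [CombineUniqueSecondList(orderList, GetDictKeysFromValues(adjacencyDict, x)) for x in uniqueValues]
--     flatlist = [x for y in orderList for x in y]
--     finlist = []
--     for x in flatlist:
--         if(x not in finlist):
--             finlist.append(x)
--     return finlist
-- ===== SOURCE B (Python) =====
-- def PairedFrequencyAlphaOrder(wordlist):
--     # one pass: pair -> frequency (per word, distinct normalized adjacent pairs), then letter -> max pair frequency
--     freq = {}
--     for word in wordlist:
--         seen = set()
--         for i in range(len(word) - 1):
--             a, b = word[i], word[i + 1]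
--             if a != b:
--                 seen.add(a + b if a < b else b + a)
--         for p in seen:
--             freq[p] = freq.get(p, 0) + 1
--     best = {}
--     for p, c in freq.items():
--         for ch in p:
--             if c > best.get(ch, 0):
--                 best[ch] = c
--     return sorted(best, key=lambda ch: (-best[ch], ch))
-- ===== Notes on version B (the rewrite author's own statement) =====
-- stated objective: simpler
-- what changed: B keeps a per-word set of normalized adjacent pairs feeding one pair->frequency dict, then replaces A's descending-frequency value grouping, per-value key rescans and two-level dedup by a single letter->max-pair-frequency dict and one sort with key (-frequency, letter).
import Mathlib
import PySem

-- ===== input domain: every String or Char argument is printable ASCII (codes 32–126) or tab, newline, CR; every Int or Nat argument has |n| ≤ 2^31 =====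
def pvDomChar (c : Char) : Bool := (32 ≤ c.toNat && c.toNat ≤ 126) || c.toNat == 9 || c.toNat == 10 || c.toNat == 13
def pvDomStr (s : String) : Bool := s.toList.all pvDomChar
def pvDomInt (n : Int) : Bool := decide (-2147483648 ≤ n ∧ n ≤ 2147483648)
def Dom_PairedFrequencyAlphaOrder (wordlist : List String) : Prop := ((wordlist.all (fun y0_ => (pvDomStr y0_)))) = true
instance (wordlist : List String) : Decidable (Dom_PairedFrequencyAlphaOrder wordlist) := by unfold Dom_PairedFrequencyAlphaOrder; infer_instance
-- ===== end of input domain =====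

-- B replaces A's frequency-value grouping, per-value key rescans and two-level dedup by a single
-- letter->max-pair-frequency dict and one sort with key (-frequency, letter): simpler, same results.

-- ===== PORT A =====  (literal transliteration of Source A; Python str values are Lean String,
-- 1- and 2-character strings are built with String.ofList; indexing via PySem.Str.pyGet?)
def GetAdjacentPairList (word : String) : List String :=
  -- pairs = [word[x] + word[x+1] for x,y in enumerate(word) if x+1 < len(word)]
  let pairs : List String := (PySem.List.enumerate word.toList).filterMap (fun xy =>
    if xy.1 + 1 < PySem.Str.len word then
      match PySem.Str.pyGet? word xy.1, PySem.Str.pyGet? word (xy.1 + 1) with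
      | some a, some b => some (String.ofList [a, b])
      | _, _ => none
    else none)
  -- sortedPairs = [''.join(sorted(x)) for x in pairs]
  let sortedPairs := pairs.map (fun x => String.ofList (PySem.List.sorted x.toList (fun c => c)))
  -- sortedPairsNoDupes = list(set(sortedPairs))
  let sortedPairsNoDupes := PySem.Set.ofList sortedPairs
  -- [x for x in sortedPairsNoDupes if x[0] != x[1]]
  let noSame := sortedPairsNoDupes.filter (fun x => !(PySem.Str.pyGet? x 0 == PySem.Str.pyGet? x 1))
  PySem.List.sorted noSame (fun x => x)

def CombineFrequencyDictAndList (theDict : PySem.Dict String Int) (nonDupeList : List String) : PySem.Dict String Int :=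
  -- {x:(int(theDict.get(x, 0))+1) for x in nonDupeList}
  nonDupeList.foldl (fun acc x => acc.insert x (theDict.getD x 0 + 1)) PySem.Dict.empty

def UniqueValuesFromDict (theDict : PySem.Dict String Int) : List Int :=
  -- sorted(list(set([theDict[x] for x in theDict])), reverse=True); theDict[x] for a present key x is getD
  PySem.List.sorted (PySem.Set.ofList (theDict.keys.map (fun x => theDict.getD x 0))) (fun v => v) true

def SortMakeUniqueList (theList : List String) : List String :=
  PySem.List.sorted (PySem.Set.ofList theList) (fun x => x)

def GetDictKeysFromValues (keyVals : PySem.Dict String Int) (val : Int) : List String :=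
  -- tempList = [list(x) for x in keyVals if keyVals[x] == val]  (list of lists of 1-char strings)
  let tempList := (keyVals.keys.filter (fun x => keyVals.getD x 0 == val)).map
      (fun x => x.toList.map (fun c => String.ofList [c]))
  SortMakeUniqueList (tempList.flatMap (fun y => y))

def CombineUniqueSecondList (lista listb : List String) : List String :=
  lista ++ listb.filter (fun x => !(lista.contains x))

def PairedFrequencyAlphaOrder (wordlist : List String) : List String :=
  let adjacencyDict := wordlist.foldl
    (fun d y => d.update (CombineFrequencyDictAndList d (GetAdjacentPairList y)).items) PySem.Dict.empty
  let orderList : List String := []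
  let uniqueValues := UniqueValuesFromDict adjacencyDict
  -- the comprehension reads the OUTER orderList, which stays []
  let orderList2 := uniqueValues.map (fun x => CombineUniqueSecondList orderList (GetDictKeysFromValues adjacencyDict x))
  let flatlist := orderList2.flatMap (fun y => y)
  flatlist.foldl (fun finlist x => if x ∈ finlist then finlist else finlist ++ [x]) []

-- ===== PORT B =====  (literal transliteration of Source B; the Python tuple sort key (-best[ch], ch)
-- is the lexicographic order on Int × String, i.e. toLex)
def PairedFrequencyAlphaOrder_alt (wordlist : List String) : List String :=
  let freq := wordlist.foldl (fun freq word =>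
    let seen := (PySem.List.pyRange 0 (PySem.Str.len word - 1) 1).foldl (fun seen i =>
      match PySem.Str.pyGet? word i, PySem.Str.pyGet? word (i + 1) with
      | some a, some b =>
        if a ≠ b then PySem.Set.add seen (if a < b then String.ofList [a, b] else String.ofList [b, a]) else seen
      | _, _ => seen) (PySem.Set.empty : PySem.Set String)
    seen.foldl (fun f p => f.insert p (f.getD p 0 + 1)) freq) PySem.Dict.empty
  let best := freq.items.foldl (fun best pc =>
    pc.1.toList.foldl (fun best ch =>
      if pc.2 > best.getD (String.ofList [ch]) 0 then best.insert (String.ofList [ch]) pc.2 else best) best)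
    (PySem.Dict.empty : PySem.Dict String Int)
  PySem.List.sorted best.keys (fun ch => toLex (-(best.getD ch 0), ch))

-- ===== PRECONDITION & SPEC =====
def Spec_PairedFrequencyAlphaOrder (wordlist : List String) (out : List String) : Prop := out = PairedFrequencyAlphaOrder_alt wordlist
instance (wordlist : List String) (out : List String) : Decidable (Spec_PairedFrequencyAlphaOrder wordlist out) := by unfold Spec_PairedFrequencyAlphaOrder; infer_instance

-- ===== CLAIM (what is proved, stated in full; the proofs are below) =====
def Claim_equal_PairedFrequencyAlphaOrder : Prop := ∀ (wordlist : List String), Dom_PairedFrequencyAlphaOrder wordlist → Spec_PairedFrequencyAlphaOrder wordlist (PairedFrequencyAlphaOrder wordlist)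

-- ===== LEMMAS AND PROOFS =====

-- letters of a pair key, as 1-character strings
def pvChars (p : String) : List String := p.toList.map (fun c => String.ofList [c])
-- a key's frequency
def pvG (d : PySem.Dict String Int) (p : String) : Int := d.getD p 0
-- max frequency of any key containing the letter x (0 if none)
def pvMF (d : PySem.Dict String Int) (x : String) : Int :=
  ((d.keys.filter (fun p => decide (x ∈ pvChars p))).map (pvG d)).foldl max 0
-- x occurs in some key of d
def pvInL (d : PySem.Dict String Int) (x : String) : Prop := ∃ p ∈ d.keys, x ∈ pvChars p
-- normalized adjacent pair
def pvNorm (a b : Char) : String := if a < b then String.ofList [a, b] else String.ofList [b, a]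
-- p is a normalized distinct adjacent pair of w
def pvPairAt (w : String) (p : String) : Prop :=
  ∃ k : Nat, ∃ a b : Char, w.toList[k]? = some a ∧ w.toList[k+1]? = some b ∧ a ≠ b ∧ p = pvNorm a b
-- the relation between A's and B's pair-frequency dicts
def pvRel (dA dB : PySem.Dict String Int) : Prop :=
  (∀ p, p ∈ dA.keys ↔ p ∈ dB.keys) ∧ (∀ p, dA.getD p 0 = dB.getD p 0) ∧
  dA.keys.Nodup ∧ dB.keys.Nodup ∧ (∀ p ∈ dA.keys, 1 ≤ dA.getD p 0)
-- A's final dedup loop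
def pvDfold (acc : List String) (l : List String) : List String :=
  l.foldl (fun finlist x => if x ∈ finlist then finlist else finlist ++ [x]) acc
-- the canonical result: for each frequency v in descending order, the letters whose max frequency is v
def pvBlock (d : PySem.Dict String Int) (v : Int) : List String :=
  (GetDictKeysFromValues d v).filter (fun x => decide (pvMF d x = v))
def pvT (d : PySem.Dict String Int) : List String :=
  ((UniqueValuesFromDict d).map (pvBlock d)).flatten

-- ---- generic helper lemmas ----
lemma pv_mem_enumerate {α : Type} (xs : List α) (s : Int) (p : Int × α) :
    p ∈ PySem.List.enumerate xs s ↔ ∃ k : Nat, xs[k]? = some p.2 ∧ p.1 = s + k := by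
  induction xs generalizing s with
  | nil => simp [PySem.List.enumerate]
  | cons x t ih =>
    rw [show PySem.List.enumerate (x :: t) s = (s, x) :: PySem.List.enumerate t (s + 1) from rfl]
    simp only [List.mem_cons, ih]
    constructor
    · rintro (h | ⟨k, hk, hs⟩)
      · exact ⟨0, by simp [h], by simp [h]⟩
      · exact ⟨k + 1, by simpa using hk, by push_cast; omega⟩
    · rintro ⟨k, hk, hs⟩
      cases k with
      | zero =>
        left
        simp only [List.getElem?_cons_zero, Option.some.injEq] at hk
        cases p; simp_all
      | succ k =>
        right
        exact ⟨k, by simpa using hk, by push_cast at hs ⊢; omega⟩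

lemma pv_dfold_append (acc : List String) (l₁ l₂ : List String) :
    pvDfold acc (l₁ ++ l₂) = pvDfold (pvDfold acc l₁) l₂ := by
  simp [pvDfold]

lemma pv_dfold_nodup (l : List String) : ∀ acc, acc.Nodup → (pvDfold acc l).Nodup := by
  induction l with
  | nil => intro acc h; simpa [pvDfold] using h
  | cons x t ih =>
    intro acc h
    rw [show pvDfold acc (x :: t) = pvDfold (if x ∈ acc then acc else acc ++ [x]) t from rfl]
    apply ih
    by_cases hm : x ∈ acc
    · simpa [hm] using h
    · rw [if_neg hm]
      simp_all [List.nodup_append]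
      intro a ha heq; subst heq; exact hm ha

lemma pv_dfold_of_nodup (l : List String) (hl : l.Nodup) : ∀ acc,
    pvDfold acc l = acc ++ l.filter (fun x => decide (x ∉ acc)) := by
  induction l with
  | nil => intro acc; simp [pvDfold]
  | cons x t ih =>
    intro acc
    have hx : x ∉ t := (List.nodup_cons.mp hl).1
    have ht : t.Nodup := (List.nodup_cons.mp hl).2
    rw [show pvDfold acc (x :: t) = pvDfold (if x ∈ acc then acc else acc ++ [x]) t from rfl]
    by_cases hm : x ∈ acc
    · rw [if_pos hm, ih ht]
      simp [hm]
    · rw [if_neg hm, ih ht]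
      have : t.filter (fun y => decide (y ∉ acc ++ [x])) = t.filter (fun y => decide (y ∉ acc)) := by
        apply List.filter_congr
        intro y hy
        have : y ≠ x := fun h => hx (h ▸ hy)
        simp [this]
      rw [this]
      simp [hm]

-- ---- phase 1: the two pair-frequency dicts agree ----
lemma pv_sorted_two (a b : Char) :
    PySem.List.sorted [a, b] (fun c => c) = if b < a then [b, a] else [a, b] := by
  simp [PySem.List.sorted, PySem.List.insertBy]

lemma pv_pairs_mem (w : String) (q : String) :
    q ∈ (PySem.List.enumerate w.toList).filterMap (fun xy =>
      if xy.1 + 1 < PySem.Str.len w then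
        match PySem.Str.pyGet? w xy.1, PySem.Str.pyGet? w (xy.1 + 1) with
        | some a, some b => some (String.ofList [a, b])
        | _, _ => none
      else none) ↔
    ∃ k : Nat, ∃ a b : Char, w.toList[k]? = some a ∧ w.toList[k+1]? = some b ∧
      q = String.ofList [a, b] := by
  rw [List.mem_filterMap]
  constructor
  · rintro ⟨xy, hmem, hf⟩
    obtain ⟨k, hk, hk1⟩ := (pv_mem_enumerate _ _ _).mp hmem
    have hxy1 : xy.1 = (k : Int) := by omega
    rw [hxy1] at hf
    by_cases hlt : (k : Int) + 1 < PySem.Str.len w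
    · rw [if_pos hlt] at hf
      have h1 : PySem.Str.pyGet? w (k : Int) = w.toList[k]? := by simp
      have h2 : PySem.Str.pyGet? w ((k : Int) + 1) = w.toList[k+1]? := by
        rw [show ((k : Int) + 1) = ((k + 1 : Nat) : Int) by omega,
          PySem.Str.pyGet?_natCast]
      rw [h1, h2, hk] at hf
      rcases hb : w.toList[k+1]? with _ | b
      · rw [hb] at hf; simp at hf
      · rw [hb] at hf
        simp only [Option.some.injEq] at hf
        exact ⟨k, _, b, hk, hb, hf.symm⟩
    · rw [if_neg hlt] at hf; simp at hf
  · rintro ⟨k, a, b, ha, hb, hq⟩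
    refine ⟨((k : Int), a), (pv_mem_enumerate _ _ _).mpr ⟨k, ha, by ring⟩, ?_⟩
    obtain ⟨hlen, -⟩ := List.getElem?_eq_some_iff.mp hb
    have hlt : (k : Int) + 1 < PySem.Str.len w := by
      simp only [PySem.Str.len_eq]
      omega
    rw [if_pos hlt]
    have h1 : PySem.Str.pyGet? w (k : Int) = w.toList[k]? := by simp
    have h2 : PySem.Str.pyGet? w ((k : Int) + 1) = w.toList[k+1]? := by
      rw [show ((k : Int) + 1) = ((k + 1 : Nat) : Int) by omega,
        PySem.Str.pyGet?_natCast]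
    rw [h1, h2, ha, hb, hq]

lemma pv_gapl_mem (w : String) (p : String) :
    p ∈ GetAdjacentPairList w ↔ pvPairAt w p := by
  unfold GetAdjacentPairList
  simp only [PySem.List.mem_sorted, List.mem_filter, PySem.Set.mem_ofList, List.mem_map,
    pv_pairs_mem]
  constructor
  · rintro ⟨⟨x, ⟨k, a, b, ha, hb, hx⟩, hp⟩, hcond⟩
    subst hx hp
    refine ⟨k, a, b, ha, hb, ?_, ?_⟩
    · -- a ≠ b from the x[0] != x[1] test
      intro hab
      subst hab
      rw [show (String.ofList [a, a]).toList = [a, a] by simp] at hcond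
      rw [pv_sorted_two] at hcond
      simp at hcond
    · -- the normalized pair
      rw [show (String.ofList [a, b]).toList = [a, b] by simp, pv_sorted_two, pvNorm]
      rcases lt_trichotomy a b with h | h | h
      · rw [if_neg (not_lt.mpr h.le), if_pos h]
      · subst h
        rw [show (String.ofList [a, a]).toList = [a, a] by simp, pv_sorted_two] at hcond
        simp at hcond
      · rw [if_pos h, if_neg (not_lt.mpr h.le)]
  · rintro ⟨k, a, b, ha, hb, hab, hp⟩
    refine ⟨⟨String.ofList [a, b], ⟨k, a, b, ha, hb, rfl⟩, ?_⟩, ?_⟩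
    · rw [show (String.ofList [a, b]).toList = [a, b] by simp, pv_sorted_two, hp, pvNorm]
      rcases lt_trichotomy a b with h | h | h
      · rw [if_neg (not_lt.mpr h.le), if_pos h]
      · exact absurd h hab
      · rw [if_pos h, if_neg (not_lt.mpr h.le)]
    · rw [hp, pvNorm]
      rcases lt_trichotomy a b with h | h | h
      · rw [if_pos h]
        simp [PySem.List.pyGet?, PySem.List.pyIdx?, hab]
      · exact absurd h hab
      · rw [if_neg (not_lt.mpr h.le)]
        simp [PySem.List.pyGet?, PySem.List.pyIdx?, Ne.symm hab]

lemma pv_gapl_nodup (w : String) : (GetAdjacentPairList w).Nodup := by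
  unfold GetAdjacentPairList
  exact (PySem.List.sorted_perm _ _ _).symm.nodup
    ((PySem.Set.nodup_ofList _).filter _)

lemma pv_seen_mem_fold (w : String) (l : List Int) :
    ∀ (s0 : PySem.Set String) (x : String),
      x ∈ l.foldl (fun seen i =>
        match PySem.Str.pyGet? w i, PySem.Str.pyGet? w (i + 1) with
        | some a, some b =>
          if a ≠ b then PySem.Set.add seen (if a < b then String.ofList [a, b] else String.ofList [b, a]) else seen
        | _, _ => seen) s0 ↔
      x ∈ s0 ∨ ∃ i ∈ l, ∃ a b : Char, PySem.Str.pyGet? w i = some a ∧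
        PySem.Str.pyGet? w (i + 1) = some b ∧ a ≠ b ∧ x = pvNorm a b := by
  induction l with
  | nil => simp
  | cons i t ih =>
    intro s0 x
    rw [List.foldl_cons, ih]
    have hstep : ∀ (s1 : PySem.Set String), x ∈ (match PySem.Str.pyGet? w i, PySem.Str.pyGet? w (i + 1) with
        | some a, some b =>
          if a ≠ b then PySem.Set.add s1 (if a < b then String.ofList [a, b] else String.ofList [b, a]) else s1
        | _, _ => s1) ↔
        x ∈ s1 ∨ ∃ a b : Char, PySem.Str.pyGet? w i = some a ∧
          PySem.Str.pyGet? w (i + 1) = some b ∧ a ≠ b ∧ x = pvNorm a b := by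
      intro s1
      rcases h1 : PySem.Str.pyGet? w i with _ | a
      · simp
      · rcases h2 : PySem.Str.pyGet? w (i + 1) with _ | b
        · simp
        · by_cases hab : a = b
          · subst hab
            simp
          · simp only [if_pos hab, PySem.Set.mem_add]
            constructor
            · rintro (h | h)
              · exact Or.inl h
              · exact Or.inr ⟨a, b, rfl, rfl, hab, by rw [h, pvNorm]⟩
            · rintro (h | ⟨a', b', ha', hb', hab', hx⟩)
              · exact Or.inl h
              · injection ha' with ha'
                injection hb' with hb'
                subst ha'
                subst hb'
                right
                rw [hx, pvNorm]
    rw [hstep]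
    simp only [List.mem_cons]
    constructor
    · rintro (( h | hex) | ⟨i', hi', hex⟩)
      · exact Or.inl h
      · exact Or.inr ⟨i, Or.inl rfl, hex⟩
      · exact Or.inr ⟨i', Or.inr hi', hex⟩
    · rintro (h | ⟨i', hi' | hi', hex⟩)
      · exact Or.inl (Or.inl h)
      · subst hi'; exact Or.inl (Or.inr hex)
      · exact Or.inr ⟨i', hi', hex⟩

lemma pv_seen_nodup (w : String) (l : List Int) :
    ∀ (s0 : PySem.Set String), s0.Nodup → (l.foldl (fun seen i =>
      match PySem.Str.pyGet? w i, PySem.Str.pyGet? w (i + 1) with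
      | some a, some b =>
        if a ≠ b then PySem.Set.add seen (if a < b then String.ofList [a, b] else String.ofList [b, a]) else seen
      | _, _ => seen) s0).Nodup := by
  induction l with
  | nil => intro s0 h; simpa using h
  | cons i t ih =>
    intro s0 h
    rw [List.foldl_cons]
    apply ih
    rcases h1 : PySem.Str.pyGet? w i with _ | a
    · exact h
    · rcases h2 : PySem.Str.pyGet? w (i + 1) with _ | b
      · exact h
      · by_cases hab : a = b
        · subst hab; simpa using h
        · simpa [hab] using PySem.Set.nodup_add _ _ h

lemma pv_seen_mem (w : String) (x : String) :
    x ∈ ((PySem.List.pyRange 0 (PySem.Str.len w - 1) 1).foldl (fun seen i =>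
      match PySem.Str.pyGet? w i, PySem.Str.pyGet? w (i + 1) with
      | some a, some b =>
        if a ≠ b then PySem.Set.add seen (if a < b then String.ofList [a, b] else String.ofList [b, a]) else seen
      | _, _ => seen) (PySem.Set.empty : PySem.Set String)) ↔ pvPairAt w x := by
  rw [pv_seen_mem_fold]
  simp only [PySem.List.mem_pyRange_one]
  constructor
  · rintro (h | ⟨i, ⟨hi0, hilt⟩, a, b, ha, hb, hab, hx⟩)
    · simp [PySem.Set.empty] at h
    · refine ⟨i.toNat, a, b, ?_, ?_, hab, hx⟩
      · have ha2 : PySem.List.pyGet? w.toList i = some a := by simpa using ha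
        rw [PySem.List.pyGet?_of_nonneg _ hi0] at ha2
        exact ha2
      · have hb2 : PySem.List.pyGet? w.toList (i + 1) = some b := by simpa using hb
        rw [PySem.List.pyGet?_of_nonneg _ (by omega : (0:Int) <= i + 1)] at hb2
        rw [show (i + 1).toNat = i.toNat + 1 by omega] at hb2
        exact hb2
  · rintro ⟨k, a, b, ha, hb, hab, hx⟩
    right
    obtain ⟨hlen, -⟩ := List.getElem?_eq_some_iff.mp hb
    refine ⟨(k : Int), ⟨by omega, ?_⟩, a, b, ?_, ?_, hab, hx⟩
    · simp only [PySem.Str.len_eq]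
      omega
    · simpa using ha
    · rw [show ((k : Int) + 1) = ((k + 1 : Nat) : Int) by omega, PySem.Str.pyGet?_natCast]
      exact hb

-- dict update with fresh-per-call values: getD after A's dict(update(dictcomp))
lemma pv_updmap_getD (g : String → Int) (l : List String) :
    ∀ (d : PySem.Dict String Int) (p : String), l.Nodup →
      (((l.map (fun x => (x, g x))).foldl (fun acc pr => acc.insert pr.1 pr.2) d).getD p 0 =
        if p ∈ l then g p else d.getD p 0) := by
  induction l with
  | nil => intro d p _; simp
  | cons x t ih =>
    intro d p hnd
    rw [List.map_cons, List.foldl_cons, ih _ _ (List.nodup_cons.mp hnd).2]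
    by_cases hpt : p ∈ t
    · rw [if_pos hpt, if_pos (List.mem_cons_of_mem _ hpt)]
    · rw [if_neg hpt, PySem.Dict.getD_insert]
      by_cases hpx : p = x
      · subst hpx; simp
      · simp [hpx, hpt]

lemma pv_items_cfdal (d : PySem.Dict String Int) (l : List String) (hnd : l.Nodup) :
    (CombineFrequencyDictAndList d l).items = l.map (fun x => (x, d.getD x 0 + 1)) := by
  unfold CombineFrequencyDictAndList
  have := PySem.Dict.items_foldl_insert_fresh l (fun a => a) (fun x => d.getD x 0 + 1)
    PySem.Dict.empty (by intro a _; simp) (by simpa using hnd)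
  simpa using this

lemma pv_rel_step (dA dB : PySem.Dict String Int) (w : String) (h : pvRel dA dB) :
    pvRel (dA.update (CombineFrequencyDictAndList dA (GetAdjacentPairList w)).items)
      ((((PySem.List.pyRange 0 (PySem.Str.len w - 1) 1).foldl (fun seen i =>
      match PySem.Str.pyGet? w i, PySem.Str.pyGet? w (i + 1) with
      | some a, some b =>
        if a ≠ b then PySem.Set.add seen (if a < b then String.ofList [a, b] else String.ofList [b, a]) else seen
      | _, _ => seen) (PySem.Set.empty : PySem.Set String)).foldl
        (fun f p => f.insert p (f.getD p 0 + 1)) dB)) := by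
  obtain ⟨hmem, hval, hndA, hndB, hpos⟩ := h
  set l := GetAdjacentPairList w with hl
  set seen := ((PySem.List.pyRange 0 (PySem.Str.len w - 1) 1).foldl (fun seen i =>
      match PySem.Str.pyGet? w i, PySem.Str.pyGet? w (i + 1) with
      | some a, some b =>
        if a ≠ b then PySem.Set.add seen (if a < b then String.ofList [a, b] else String.ofList [b, a]) else seen
      | _, _ => seen) (PySem.Set.empty : PySem.Set String)) with hseen
  have hlnd : l.Nodup := pv_gapl_nodup w
  have hsnd : seen.Nodup := pv_seen_nodup w _ _ (by simp [PySem.Set.empty])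
  have hls : ∀ p, p ∈ l ↔ p ∈ seen := by
    intro p
    rw [hl, pv_gapl_mem, hseen, ← pv_seen_mem w p]
  -- A side: update with the comprehension's items is a fold of inserts over l
  have hupd : dA.update (CombineFrequencyDictAndList dA l).items =
      (l.map (fun x => (x, dA.getD x 0 + 1))).foldl (fun acc pr => acc.insert pr.1 pr.2) dA := by
    rw [pv_items_cfdal dA l hlnd]
    rfl
  have hAget : ∀ p, (dA.update (CombineFrequencyDictAndList dA l).items).getD p 0 =
      if p ∈ l then dA.getD p 0 + 1 else dA.getD p 0 := by
    intro p
    rw [hupd, pv_updmap_getD _ _ _ _ hlnd]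
  have hAkeys : ∀ p, p ∈ (dA.update (CombineFrequencyDictAndList dA l).items).keys ↔
      p ∈ dA.keys ∨ p ∈ l := by
    intro p
    rw [hupd, PySem.Dict.keys_foldl_insert_key _ Prod.fst _ _]
    rw [PySem.Set.mem_update]
    simp
  have hAnd : (dA.update (CombineFrequencyDictAndList dA l).items).keys.Nodup := by
    rw [hupd]
    exact PySem.Dict.nodup_keys_foldl_insert_key _ Prod.fst _ _ hndA
  -- B side
  have hBget : ∀ p, (seen.foldl (fun f p => f.insert p (f.getD p 0 + 1)) dB).getD p 0 =
      dB.getD p 0 + seen.count p := by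
    intro p
    exact PySem.Dict.getD_foldl_insert_add_one seen dB p
  have hBkeys : ∀ p, p ∈ (seen.foldl (fun f p => f.insert p (f.getD p 0 + 1)) dB).keys ↔
      p ∈ dB.keys ∨ p ∈ seen := by
    intro p
    rw [PySem.Dict.keys_foldl_insert seen _ dB, PySem.Set.mem_update]
  have hBnd : (seen.foldl (fun f p => f.insert p (f.getD p 0 + 1)) dB).keys.Nodup :=
    PySem.Dict.nodup_keys_foldl_insert seen _ dB hndB
  have hgann : ∀ p, 0 ≤ dA.getD p 0 := by
    intro p
    by_cases hp : p ∈ dA.keys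
    · exact le_trans (by norm_num) (hpos p hp)
    · rw [PySem.Dict.getD_of_not_contains]
      rw [← Bool.not_eq_true, PySem.Dict.contains_iff_mem_keys]
      exact hp
  refine ⟨?_, ?_, hAnd, hBnd, ?_⟩
  · intro p
    rw [hAkeys, hBkeys, hmem p, hls p]
  · intro p
    rw [hAget, hBget]
    by_cases hp : p ∈ l
    · rw [if_pos hp, List.count_eq_one_of_mem hsnd ((hls p).mp hp), hval p]
      push_cast
      ring
    · rw [if_neg hp, List.count_eq_zero_of_not_mem (fun hc => hp ((hls p).mpr hc)), hval p]
      simp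
  · intro p hp
    rw [hAget]
    rcases (hAkeys p).mp hp with hpk | hpl
    · by_cases hpl2 : p ∈ l
      · rw [if_pos hpl2]
        have := hpos p hpk
        omega
      · rw [if_neg hpl2]
        exact hpos p hpk
    · rw [if_pos hpl]
      have := hgann p
      omega

lemma pv_rel_final (wordlist : List String) :
    pvRel (wordlist.foldl (fun d y => d.update (CombineFrequencyDictAndList d (GetAdjacentPairList y)).items) PySem.Dict.empty)
      (wordlist.foldl (fun freq word =>
        let seen := (PySem.List.pyRange 0 (PySem.Str.len word - 1) 1).foldl (fun seen i =>
          match PySem.Str.pyGet? word i, PySem.Str.pyGet? word (i + 1) with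
          | some a, some b =>
            if a ≠ b then PySem.Set.add seen (if a < b then String.ofList [a, b] else String.ofList [b, a]) else seen
          | _, _ => seen) (PySem.Set.empty : PySem.Set String)
        seen.foldl (fun f p => f.insert p (f.getD p 0 + 1)) freq) PySem.Dict.empty) := by
  have base : pvRel PySem.Dict.empty PySem.Dict.empty := by
    refine ⟨fun p => Iff.rfl, fun p => rfl, ?_, ?_, ?_⟩
    · simp
    · simp
    · intro p hp
      simp [PySem.Dict.keys, PySem.Dict.empty] at hp
  suffices H : ∀ (ws : List String) (dA dB : PySem.Dict String Int), pvRel dA dB →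
      pvRel (ws.foldl (fun d y => d.update (CombineFrequencyDictAndList d (GetAdjacentPairList y)).items) dA)
        (ws.foldl (fun freq word =>
          let seen := (PySem.List.pyRange 0 (PySem.Str.len word - 1) 1).foldl (fun seen i =>
            match PySem.Str.pyGet? word i, PySem.Str.pyGet? word (i + 1) with
            | some a, some b =>
              if a ≠ b then PySem.Set.add seen (if a < b then String.ofList [a, b] else String.ofList [b, a]) else seen
            | _, _ => seen) (PySem.Set.empty : PySem.Set String)
          seen.foldl (fun f p => f.insert p (f.getD p 0 + 1)) freq) dB) by
    exact H wordlist _ _ base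
  intro ws
  induction ws with
  | nil => intro dA dB h; simpa using h
  | cons w t ih =>
    intro dA dB h
    rw [List.foldl_cons, List.foldl_cons]
    exact ih _ _ (pv_rel_step dA dB w h)

-- ---- phase 2: both phase-2 computations produce the canonical list pvT ----
lemma pv_V_mem (d : PySem.Dict String Int) (v : Int) :
    v ∈ UniqueValuesFromDict d ↔ ∃ p ∈ d.keys, pvG d p = v := by
  unfold UniqueValuesFromDict
  simp [PySem.List.mem_sorted, PySem.Set.mem_ofList, pvG]

lemma pv_V_sorted (d : PySem.Dict String Int) :
    (UniqueValuesFromDict d).Pairwise (fun a b => b < a) := by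
  have h1 := PySem.List.sorted_pairwise_rev
    (PySem.Set.ofList (d.keys.map (fun x => d.getD x 0))) (fun v => v)
  have h2 : (UniqueValuesFromDict d).Nodup := by
    unfold UniqueValuesFromDict
    exact (PySem.List.sorted_perm _ _ _).symm.nodup (PySem.Set.nodup_ofList _)
  have := (h1.and h2)
  exact this.imp (fun {a b} h => lt_of_le_of_ne h.1 (Ne.symm h.2))

lemma pv_group_mem (d : PySem.Dict String Int) (v : Int) (x : String) :
    x ∈ GetDictKeysFromValues d v ↔ ∃ p ∈ d.keys, pvG d p = v ∧ x ∈ pvChars p := by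
  unfold GetDictKeysFromValues SortMakeUniqueList
  simp only [PySem.List.mem_sorted, PySem.Set.mem_ofList, List.mem_flatMap, List.mem_map,
    List.mem_filter, beq_iff_eq]
  constructor
  · rintro ⟨ys, ⟨p, ⟨hp, hv⟩, hys⟩, hx⟩
    exact ⟨p, hp, hv, by rw [← hys] at hx; simpa [pvChars] using hx⟩
  · rintro ⟨p, hp, hv, hx⟩
    exact ⟨p.toList.map (fun c => String.ofList [c]), ⟨p, ⟨hp, hv⟩, rfl⟩, by simpa [pvChars] using hx⟩

lemma pv_group_nodup (d : PySem.Dict String Int) (v : Int) : (GetDictKeysFromValues d v).Nodup := by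
  unfold GetDictKeysFromValues SortMakeUniqueList
  exact (PySem.List.sorted_perm _ _ _).symm.nodup (PySem.Set.nodup_ofList _)

lemma pv_group_sorted (d : PySem.Dict String Int) (v : Int) :
    (GetDictKeysFromValues d v).Pairwise (fun a b => a < b) := by
  have h1 : (GetDictKeysFromValues d v).Pairwise (fun a b => a ≤ b) := by
    unfold GetDictKeysFromValues SortMakeUniqueList
    exact PySem.List.sorted_pairwise _ _
  exact (h1.and (pv_group_nodup d v)).imp (fun {a b} h => lt_of_le_of_ne h.1 h.2)

lemma pv_mf_ge (d : PySem.Dict String Int) (x p : String) (hp : p ∈ d.keys) (hx : x ∈ pvChars p) :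
    pvG d p ≤ pvMF d x := by
  unfold pvMF
  rw [List.foldl_map]
  exact (PySem.List.le_foldl_max_int _ (pvG d) 0).2 p (List.mem_filter.mpr ⟨hp, by simpa using hx⟩)

lemma pv_mf_attained (d : PySem.Dict String Int)
    (hpos : ∀ p ∈ d.keys, 1 ≤ d.getD p 0) (x : String) (hx : pvInL d x) :
    ∃ p ∈ d.keys, x ∈ pvChars p ∧ pvG d p = pvMF d x := by
  obtain ⟨p0, hp0, hxp0⟩ := hx
  rcases PySem.List.foldl_max_mem ((d.keys.filter (fun p => decide (x ∈ pvChars p))).map (pvG d)) 0 with h | h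
  · exfalso
    have h1 : pvG d p0 ≤ pvMF d x := pv_mf_ge d x p0 hp0 hxp0
    have h2 : 1 ≤ pvG d p0 := hpos p0 hp0
    have h3 : pvMF d x = 0 := h
    omega
  · rw [List.mem_map] at h
    obtain ⟨p, hpf, hgp⟩ := h
    rw [List.mem_filter] at hpf
    exact ⟨p, hpf.1, by simpa using hpf.2, hgp⟩

lemma pv_mf_pos_iff (d : PySem.Dict String Int)
    (hpos : ∀ p ∈ d.keys, 1 ≤ d.getD p 0) (x : String) :
    pvInL d x ↔ 0 < pvMF d x := by
  constructor
  · intro hx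
    obtain ⟨p, hp, -, hg⟩ := pv_mf_attained d hpos x hx
    have := hpos p hp
    rw [← hg]
    show (0:Int) < d.getD p 0
    omega
  · intro h
    rcases PySem.List.foldl_max_mem ((d.keys.filter (fun p => decide (x ∈ pvChars p))).map (pvG d)) 0 with h0 | h0
    · exfalso
      have h1 : pvMF d x = 0 := h0
      omega
    · rw [List.mem_map] at h0
      obtain ⟨p, hpf, -⟩ := h0
      rw [List.mem_filter] at hpf
      exact ⟨p, hpf.1, by simpa using hpf.2⟩

lemma pv_mf_in_V (d : PySem.Dict String Int)
    (hpos : ∀ p ∈ d.keys, 1 ≤ d.getD p 0) (x : String) (hx : pvInL d x) :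
    pvMF d x ∈ UniqueValuesFromDict d := by
  obtain ⟨p, hp, -, hg⟩ := pv_mf_attained d hpos x hx
  exact (pv_V_mem d _).mpr ⟨p, hp, hg⟩

lemma pv_mem_group_mf (d : PySem.Dict String Int)
    (hpos : ∀ p ∈ d.keys, 1 ≤ d.getD p 0) (x : String) (hx : pvInL d x) :
    x ∈ GetDictKeysFromValues d (pvMF d x) := by
  obtain ⟨p, hp, hxc, hg⟩ := pv_mf_attained d hpos x hx
  exact (pv_group_mem d _ x).mpr ⟨p, hp, hg, hxc⟩

lemma pv_group_sub_L (d : PySem.Dict String Int) (v : Int) (x : String)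
    (hx : x ∈ GetDictKeysFromValues d v) : pvInL d x := by
  obtain ⟨p, hp, -, hxc⟩ := (pv_group_mem d v x).mp hx
  exact ⟨p, hp, hxc⟩

lemma pv_aMain (d : PySem.Dict String Int)
    (hpos : ∀ p ∈ d.keys, 1 ≤ d.getD p 0) :
    ∀ (U P : List Int) (acc : List String),
      UniqueValuesFromDict d = P ++ U →
      (∀ x, x ∈ acc ↔ pvInL d x ∧ pvMF d x ∈ P) →
      pvDfold acc (U.map (GetDictKeysFromValues d)).flatten =
        acc ++ (U.map (pvBlock d)).flatten := by
  intro U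
  induction U with
  | nil => intro P acc hV hacc; simp [pvDfold]
  | cons v U' ih =>
    intro P acc hV hacc
    have hVs : (UniqueValuesFromDict d).Pairwise (fun a b => b < a) := pv_V_sorted d
    rw [hV] at hVs
    rw [List.pairwise_append] at hVs
    obtain ⟨hP, hvU, hcross⟩ := hVs
    rw [List.pairwise_cons] at hvU
    obtain ⟨hvU', -⟩ := hvU
    have hmemP : ∀ x, x ∈ GetDictKeysFromValues d v → (x ∈ acc ↔ v < pvMF d x) := by
      intro x hxg
      have hxL : pvInL d x := pv_group_sub_L d v x hxg
      have hmfV : pvMF d x ∈ UniqueValuesFromDict d := pv_mf_in_V d hpos x hxL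
      rw [hV] at hmfV
      rw [hacc]
      constructor
      · rintro ⟨-, hmfP⟩
        exact hcross _ hmfP v (List.mem_cons_self)
      · intro hlt
        refine ⟨hxL, ?_⟩
        rcases List.mem_append.mp hmfV with h | h
        · exact h
        · exfalso
          rcases List.mem_cons.mp h with h | h
          · omega
          · have := hvU' _ h
            omega
    have hge : ∀ x, x ∈ GetDictKeysFromValues d v → v ≤ pvMF d x := by
      intro x hxg
      obtain ⟨p, hp, hgv, hxc⟩ := (pv_group_mem d v x).mp hxg
      rw [← hgv]
      exact pv_mf_ge d x p hp hxc
    rw [List.map_cons, List.flatten_cons, pv_dfold_append,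
      pv_dfold_of_nodup _ (pv_group_nodup d v)]
    have hfc : (GetDictKeysFromValues d v).filter (fun x => decide (x ∉ acc)) = pvBlock d v := by
      unfold pvBlock
      apply List.filter_congr
      intro x hx
      have h1 := hmemP x hx
      have h2 := hge x hx
      simp only [decide_eq_decide]
      rw [h1]
      omega
    rw [hfc]
    rw [ih (P ++ [v]) (acc ++ pvBlock d v) (by rw [hV]; simp) ?_]
    · rw [List.map_cons, List.flatten_cons]
      simp [List.append_assoc]
    · intro x
      rw [List.mem_append, hacc]
      constructor
      · rintro (⟨hL, hmP⟩ | hxb)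
        · exact ⟨hL, by simp [hmP]⟩
        · unfold pvBlock at hxb
          rw [List.mem_filter] at hxb
          have hL := pv_group_sub_L d v x hxb.1
          have : pvMF d x = v := by simpa using hxb.2
          exact ⟨hL, by simp [this]⟩
      · rintro ⟨hL, hmPv⟩
        rcases List.mem_append.mp hmPv with h | h
        · exact Or.inl ⟨hL, h⟩
        · have hv : pvMF d x = v := by simpa using h
          right
          unfold pvBlock
          rw [List.mem_filter]
          refine ⟨?_, by simp [hv]⟩
          rw [← hv]
          exact pv_mem_group_mf d hpos x hL

lemma pv_cusl_nil (g : List String) : CombineUniqueSecondList [] g = g := by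
  unfold CombineUniqueSecondList
  simp

lemma pv_T_mem (d : PySem.Dict String Int)
    (hpos : ∀ p ∈ d.keys, 1 ≤ d.getD p 0) (x : String) :
    x ∈ pvT d ↔ pvInL d x := by
  unfold pvT
  rw [List.mem_flatten]
  constructor
  · rintro ⟨l, hl, hx⟩
    rw [List.mem_map] at hl
    obtain ⟨v, -, hv⟩ := hl
    rw [← hv] at hx
    unfold pvBlock at hx
    exact pv_group_sub_L d v x (List.mem_filter.mp hx).1
  · intro hx
    refine ⟨pvBlock d (pvMF d x), List.mem_map.mpr ⟨pvMF d x, pv_mf_in_V d hpos x hx, rfl⟩, ?_⟩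
    unfold pvBlock
    rw [List.mem_filter]
    exact ⟨pv_mem_group_mf d hpos x hx, by simp⟩

lemma pv_T_pairwise (d : PySem.Dict String Int) :
    (pvT d).Pairwise (fun a b => pvMF d b < pvMF d a ∨ (pvMF d a = pvMF d b ∧ a < b)) := by
  unfold pvT
  rw [List.pairwise_flatten]
  constructor
  · intro l hl
    rw [List.mem_map] at hl
    obtain ⟨v, -, hv⟩ := hl
    subst hv
    unfold pvBlock
    have h1 : (GetDictKeysFromValues d v).Pairwise (fun a b => a < b) := pv_group_sorted d v
    have h2 := h1.filter (p := fun x => decide (pvMF d x = v))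
    apply h2.imp_of_mem
    intro a b ha hb hab
    rw [List.mem_filter] at ha hb
    right
    have ha2 : pvMF d a = v := by simpa using ha.2
    have hb2 : pvMF d b = v := by simpa using hb.2
    exact ⟨by rw [ha2, hb2], hab⟩
  · have := (pv_V_sorted d).map (pvBlock d)
      (S := fun l₁ l₂ => ∀ x ∈ l₁, ∀ y ∈ l₂, pvMF d y < pvMF d x ∨ (pvMF d x = pvMF d y ∧ x < y))
      ?_
    · exact this
    · intro v w hwv x hx y hy
      unfold pvBlock at hx hy
      rw [List.mem_filter] at hx hy
      have hx2 : pvMF d x = v := by simpa using hx.2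
      have hy2 : pvMF d y = w := by simpa using hy.2
      left
      rw [hx2, hy2]
      exact hwv

lemma pv_T_nodup (d : PySem.Dict String Int)
    (hpos : ∀ p ∈ d.keys, 1 ≤ d.getD p 0) : (pvT d).Nodup := by
  have h := pv_aMain d hpos (UniqueValuesFromDict d) [] [] (by simp) (by simp)
  rw [List.nil_append] at h
  unfold pvT
  rw [← h]
  exact pv_dfold_nodup _ [] (by simp)

-- ---- phase 2, B side: the letter -> max-frequency dict ----
lemma pv_inner_getD (c : Int) (cs : List Char) :
    ∀ (b : PySem.Dict String Int) (x : String),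
      (cs.foldl (fun best ch => if c > best.getD (String.ofList [ch]) 0
          then best.insert (String.ofList [ch]) c else best) b).getD x 0 =
        if x ∈ cs.map (fun ch => String.ofList [ch]) then max (b.getD x 0) c else b.getD x 0 := by
  induction cs with
  | nil => intro b x; simp
  | cons ch t ih =>
    intro b x
    rw [List.foldl_cons, ih]
    by_cases hxs : x = String.ofList [ch]
    · have hb' : (if c > b.getD (String.ofList [ch]) 0
          then b.insert (String.ofList [ch]) c else b).getD x 0 = max (b.getD x 0) c := by
        rw [← hxs]
        by_cases hc : c > b.getD x 0
        · rw [if_pos hc, PySem.Dict.getD_insert_self]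
          exact (max_eq_right hc.le).symm
        · rw [if_neg hc]
          exact (max_eq_left (not_lt.mp hc)).symm
      rw [hb']
      have hmem : x ∈ (ch :: t).map (fun ch => String.ofList [ch]) := by
        rw [List.map_cons, hxs]; exact List.mem_cons_self ..
      rw [if_pos hmem]
      by_cases hmt : x ∈ t.map (fun ch => String.ofList [ch])
      · rw [if_pos hmt, max_assoc, max_self]
      · rw [if_neg hmt]
    · have hb' : (if c > b.getD (String.ofList [ch]) 0
          then b.insert (String.ofList [ch]) c else b).getD x 0 = b.getD x 0 := by
        by_cases hc : c > b.getD (String.ofList [ch]) 0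
        · rw [if_pos hc, PySem.Dict.getD_insert]
          rw [if_neg hxs]
        · rw [if_neg hc]
      rw [hb']
      have : (x ∈ (ch :: t).map (fun ch => String.ofList [ch])) ↔
          (x ∈ t.map (fun ch => String.ofList [ch])) := by
        rw [List.map_cons, List.mem_cons]
        simp [hxs]
      by_cases hmt : x ∈ t.map (fun ch => String.ofList [ch])
      · rw [if_pos hmt, if_pos (this.mpr hmt)]
      · rw [if_neg hmt, if_neg (fun hc => hmt (this.mp hc))]

lemma pv_keypos_nonneg (b : PySem.Dict String Int)
    (h : ∀ y, y ∈ b.keys ↔ 0 < b.getD y 0) (y : String) : 0 ≤ b.getD y 0 := by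
  by_cases hy : y ∈ b.keys
  · exact ((h y).mp hy).le
  · rw [PySem.Dict.getD_of_not_contains]
    · rw [← Bool.not_eq_true, PySem.Dict.contains_iff_mem_keys]
      exact hy

lemma pv_inner_keypos (c : Int) (cs : List Char) :
    ∀ (b : PySem.Dict String Int), (∀ y, y ∈ b.keys ↔ 0 < b.getD y 0) →
      ∀ y, y ∈ (cs.foldl (fun best ch => if c > best.getD (String.ofList [ch]) 0
          then best.insert (String.ofList [ch]) c else best) b).keys ↔
        0 < (cs.foldl (fun best ch => if c > best.getD (String.ofList [ch]) 0
          then best.insert (String.ofList [ch]) c else best) b).getD y 0 := by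
  induction cs with
  | nil => intro b h y; exact h y
  | cons ch t ih =>
    intro b h y
    rw [List.foldl_cons]
    apply ih
    intro z
    by_cases hc : c > b.getD (String.ofList [ch]) 0
    · rw [if_pos hc, PySem.Dict.mem_keys_insert, PySem.Dict.getD_insert]
      by_cases hz : z = String.ofList [ch]
      · rw [if_pos hz]
        have := pv_keypos_nonneg b h (String.ofList [ch])
        constructor
        · intro; omega
        · intro; exact Or.inl hz
      · rw [if_neg hz]
        rw [← h z]
        constructor
        · rintro (hzz | hzz)
          · exact absurd hzz hz
          · exact hzz
        · exact Or.inr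
    · rw [if_neg hc]
      exact h z

lemma pv_inner_nodup (c : Int) (cs : List Char) :
    ∀ (b : PySem.Dict String Int), b.keys.Nodup →
      (cs.foldl (fun best ch => if c > best.getD (String.ofList [ch]) 0
          then best.insert (String.ofList [ch]) c else best) b).keys.Nodup := by
  induction cs with
  | nil => intro b h; exact h
  | cons ch t ih =>
    intro b h
    rw [List.foldl_cons]
    apply ih
    by_cases hc : c > b.getD (String.ofList [ch]) 0
    · rw [if_pos hc]
      exact PySem.Dict.nodup_keys_insert _ _ _ h
    · rw [if_neg hc]
      exact h

lemma pv_outer_getD (is : List (String × Int)) :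
    ∀ (b : PySem.Dict String Int) (x : String),
      (is.foldl (fun best pc => pc.1.toList.foldl (fun best ch =>
          if pc.2 > best.getD (String.ofList [ch]) 0
          then best.insert (String.ofList [ch]) pc.2 else best) best) b).getD x 0 =
        ((is.filter (fun pc => decide (x ∈ pvChars pc.1))).map Prod.snd).foldl max (b.getD x 0) := by
  induction is with
  | nil => intro b x; simp
  | cons pc t ih =>
    intro b x
    rw [List.foldl_cons, ih, pv_inner_getD]
    by_cases hm : x ∈ pvChars pc.1
    · rw [if_pos (by simpa [pvChars] using hm), List.filter_cons_of_pos (by simpa using hm),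
        List.map_cons, List.foldl_cons]
    · rw [if_neg (by simpa [pvChars] using hm), List.filter_cons_of_neg (by simpa using hm)]

lemma pv_outer_keypos (is : List (String × Int)) :
    ∀ (b : PySem.Dict String Int), (∀ y, y ∈ b.keys ↔ 0 < b.getD y 0) →
      ∀ y, y ∈ (is.foldl (fun best pc => pc.1.toList.foldl (fun best ch =>
          if pc.2 > best.getD (String.ofList [ch]) 0
          then best.insert (String.ofList [ch]) pc.2 else best) best) b).keys ↔
        0 < (is.foldl (fun best pc => pc.1.toList.foldl (fun best ch =>
          if pc.2 > best.getD (String.ofList [ch]) 0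
          then best.insert (String.ofList [ch]) pc.2 else best) best) b).getD y 0 := by
  induction is with
  | nil => intro b h y; exact h y
  | cons pc t ih =>
    intro b h y
    rw [List.foldl_cons]
    exact ih _ (pv_inner_keypos pc.2 pc.1.toList b h) y

lemma pv_outer_nodup (is : List (String × Int)) :
    ∀ (b : PySem.Dict String Int), b.keys.Nodup →
      (is.foldl (fun best pc => pc.1.toList.foldl (fun best ch =>
          if pc.2 > best.getD (String.ofList [ch]) 0
          then best.insert (String.ofList [ch]) pc.2 else best) best) b).keys.Nodup := by
  induction is with
  | nil => intro b h; exact h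
  | cons pc t ih =>
    intro b h
    rw [List.foldl_cons]
    exact ih _ (pv_inner_nodup pc.2 pc.1.toList b h)

lemma pv_best_getD (dB : PySem.Dict String Int) (hnd : dB.keys.Nodup) (x : String) :
    (dB.items.foldl (fun best pc => pc.1.toList.foldl (fun best ch =>
        if pc.2 > best.getD (String.ofList [ch]) 0
        then best.insert (String.ofList [ch]) pc.2 else best) best)
      (PySem.Dict.empty : PySem.Dict String Int)).getD x 0 = pvMF dB x := by
  rw [pv_outer_getD]
  rw [PySem.Dict.items_eq_map_keys dB hnd 0]
  rw [List.filter_map, List.map_map]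
  unfold pvMF
  congr 1

-- mf and membership transfer along pvRel
lemma pv_mf_bridge (dA dB : PySem.Dict String Int) (h : pvRel dA dB) (x : String) :
    pvMF dA x = pvMF dB x := by
  obtain ⟨hmem, hval, hndA, hndB, -⟩ := h
  have hperm : (dA.keys.filter (fun p => decide (x ∈ pvChars p))).Perm
      (dB.keys.filter (fun p => decide (x ∈ pvChars p))) := by
    rw [List.perm_ext_iff_of_nodup (hndA.filter _) (hndB.filter _)]
    intro a
    rw [List.mem_filter, List.mem_filter, hmem a]
  have h1 : pvMF dA x = ((dA.keys.filter (fun p => decide (x ∈ pvChars p))).map (pvG dB)).foldl max 0 := by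
    unfold pvMF
    congr 1
    exact List.map_congr_left (fun a _ => hval a)
  rw [h1]
  unfold pvMF
  exact (hperm.map (pvG dB)).foldl_eq' (fun p _ q _ z => max_right_comm z _ _) 0

lemma pv_inL_bridge (dA dB : PySem.Dict String Int) (h : pvRel dA dB) (x : String) :
    pvInL dA x ↔ pvInL dB x := by
  obtain ⟨hmem, -, -, -, -⟩ := h
  unfold pvInL
  constructor
  · rintro ⟨p, hp, hx⟩; exact ⟨p, (hmem p).mp hp, hx⟩
  · rintro ⟨p, hp, hx⟩; exact ⟨p, (hmem p).mpr hp, hx⟩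

-- ===== VERDICT (by name: the statement is the Claim_ definition above) =====
theorem PairedFrequencyAlphaOrder_spec : Claim_equal_PairedFrequencyAlphaOrder := by
  intro wordlist _
  unfold Spec_PairedFrequencyAlphaOrder
  have hrel' := pv_rel_final wordlist
  set DA : PySem.Dict String Int := wordlist.foldl
    (fun d y => d.update (CombineFrequencyDictAndList d (GetAdjacentPairList y)).items)
    PySem.Dict.empty with hDA
  set DB : PySem.Dict String Int := wordlist.foldl (fun freq word =>
      let seen := (PySem.List.pyRange 0 (PySem.Str.len word - 1) 1).foldl (fun seen i =>
        match PySem.Str.pyGet? word i, PySem.Str.pyGet? word (i + 1) with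
        | some a, some b =>
          if a ≠ b then PySem.Set.add seen (if a < b then String.ofList [a, b] else String.ofList [b, a]) else seen
        | _, _ => seen) (PySem.Set.empty : PySem.Set String)
      seen.foldl (fun f p => f.insert p (f.getD p 0 + 1)) freq) PySem.Dict.empty with hDB
  set BEST : PySem.Dict String Int := DB.items.foldl (fun best pc =>
      pc.1.toList.foldl (fun best ch =>
        if pc.2 > best.getD (String.ofList [ch]) 0
        then best.insert (String.ofList [ch]) pc.2 else best) best)
    (PySem.Dict.empty : PySem.Dict String Int) with hBEST
  obtain ⟨hmem, hval, hndA, hndB, hposA⟩ := hrel'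
  have hrel2 : pvRel DA DB := ⟨hmem, hval, hndA, hndB, hposA⟩
  have hposB : ∀ p ∈ DB.keys, 1 ≤ DB.getD p 0 := by
    intro p hp
    rw [← hval p]
    exact hposA p ((hmem p).mpr hp)
  -- A's result is the canonical list
  have hA : PairedFrequencyAlphaOrder wordlist = pvDfold []
      (((UniqueValuesFromDict DA).map
        (fun x => CombineUniqueSecondList [] (GetDictKeysFromValues DA x))).flatMap (fun y => y)) := rfl
  have hA2 : PairedFrequencyAlphaOrder wordlist = pvT DA := by
    rw [hA, List.map_congr_left (fun v _ => pv_cusl_nil (GetDictKeysFromValues DA v))]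
    rw [show ((UniqueValuesFromDict DA).map (GetDictKeysFromValues DA)).flatMap (fun y => y) =
      ((UniqueValuesFromDict DA).map (GetDictKeysFromValues DA)).flatten from by simp]
    exact pv_aMain DA hposA _ [] [] (by simp) (by simp)
  -- B's result is the sort of BEST's keys
  have hB : PairedFrequencyAlphaOrder_alt wordlist =
      PySem.List.sorted BEST.keys (fun ch => toLex (-(BEST.getD ch 0), ch)) := rfl
  have hkeyiff : ∀ y, y ∈ BEST.keys ↔ 0 < BEST.getD y 0 := by
    rw [hBEST]
    exact pv_outer_keypos DB.items PySem.Dict.empty (by intro y; simp) 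
  have hbget : ∀ x, BEST.getD x 0 = pvMF DB x := by
    rw [hBEST]
    exact pv_best_getD DB hndB
  have hbnodup : BEST.keys.Nodup := by
    rw [hBEST]
    exact pv_outer_nodup DB.items PySem.Dict.empty (by simp)
  have hTmem : ∀ x, x ∈ pvT DA ↔ x ∈ BEST.keys := by
    intro x
    rw [pv_T_mem DA hposA x, hkeyiff x, hbget x, pv_inL_bridge DA DB hrel2 x]
    exact pv_mf_pos_iff DB hposB x
  have hperm : (pvT DA).Perm BEST.keys :=
    (List.perm_ext_iff_of_nodup (pv_T_nodup DA hposA) hbnodup).mpr hTmem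
  have hpw : (pvT DA).Pairwise (fun a b =>
      (fun ch => toLex (-(BEST.getD ch 0), ch)) a < (fun ch => toLex (-(BEST.getD ch 0), ch)) b) := by
    apply (pv_T_pairwise DA).imp_of_mem
    intro a b _ _ hr
    simp only
    rw [hbget a, hbget b, ← pv_mf_bridge DA DB hrel2 a, ← pv_mf_bridge DA DB hrel2 b]
    rcases hr with h | ⟨h1, h2⟩
    · exact Prod.Lex.toLex_lt_toLex.mpr (Or.inl (by omega))
    · exact Prod.Lex.toLex_lt_toLex.mpr (Or.inr ⟨by omega, h2⟩)
  rw [hA2, hB, PySem.List.sorted_eq_of_perm_of_pairwise_lt _ _ _ hperm hpw]
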